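/-
  THE CONTRACT OF `decode_residue` (c/stb_vorbis_fixed.c 2132–2311; design/CONTRACTS.md entry 60) AND THE ASSERTIONS OF ITS 11 SEGMENTS.

  decode_residue is one function of 813 instructions with a PROTECTED frame (`Vorbis.Frames.decode_residue`: the two address-taken ints
  `c_inter`, `p_inter`), twelve loops and thirteen calls. It is proved in 11 segments + 1 composition unit; this file holds

      decode_residue.spec len A others frames stored room ysz
                                                       THE `Spec` (pre / post / frame 848 / writes) of the whole function. Its precondition is
                                                       LITERALLY "THE DECODE-TIME INVARIANT + THE ARGUMENTS": `Pre` = `ShadowPre` ∧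
                                                       `DecodeInv others frames len A stored room ysz` (Vorbis/Spec/DecodeInv.lean: what the
                                                       one caller, vorbis_decode_packet_rest.9, holds) ∧ `Args`; its postcondition gives the
                                                       SAME `DecodeInv` back for the memory at the return. The block predicate is the run's,
                                                       `RunBlk A len`. (Was S7's own carriers `env reader free arenaText vorbis sep books ado`
                                                       over an abstract `Blk`: they are THEOREMS of the same names now, `Pre.env` … `Pre.ado`.)
      DecodeResidue.BlkFree Blk A                      the two laws of the block predicate a decode-time allocator client needs besides
                                                       `BlkOK` / `BlkLive`: every allocated block is off the stack region and off the free
                                                       part `[B + S, B + L)` of the arena (where the temp block lives); `Pre.free` is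
                                                       `DecodeInv.offStack` / `.offGap`
      DecodeResidue.Args                               P1 / P2 of CONTRACTS: the six arguments
      DecodeResidue.G                                  THE GHOST BUNDLE of one activation: the Spec's ghosts, the entry state `e`, the return
                                                       address; everything else (the block predicate `g.Blk = RunBlk g.A g.len`,
                                                       `f rb ch n rn dnd`, `r rtype C W PRD`, `sz`, the busy arena `A'`, the temp block `TB`,
                                                       the live lists inside the frame) is DEFINED from it
      DecodeResidue.Entered.frame / .post              THE FRAME OF A SEGMENT (`VorbisOK`, SEP, `DecodeSame` in a memory that differs inside
                                                       the footprint only) and THE POSTCONDITION FROM WHAT SEGMENT 11 ESTABLISHES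
                                                       (`DecodeInv.frame_stores` over the footprint)
      DecodeResidue.Common u₀ g v                      COMMON = FR ∧ ENV of CONTRACTS `defs`: what holds at EVERY cut point after the
                                                       allocation: the frame (rbp, rsp, the six saved registers, the eight constant spill
                                                       slots), the footprint so far, the shadow layer with the frame pushed and the temp
                                                       block live, `Real.InFrame` + `Separated` (the decoder invariant with ONE temp block
                                                       outstanding), TB (`TempRows`), "the configuration reads as at the entry"
      DecodeResidue.At<k> u₀ g … v                     the assertion at the label `Vorbis.L.decode_residue.cut<k>`, one per segment entry:
                                                       a segment's exit assertion IS its successor's entry assertion (the same constant)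

  THE CUT POINTS (k, address, what it is, the loop variables that are GHOST PARAMETERS of the assertion — exposed because the loop they
  belong to crosses a segment boundary, so that the composition unit can state a measure):

       3  0x10ee39  head of loop 2152 (memset)                 —            8  0x10ef08  path A (rtype = 2, ch ≠ 1)                —
       5  0x10eea8  path B (rtype ≠ 2 or ch = 1)               —           24  0x10f6a0  latch of the pass loop 2163 (path A)       pass
      15  0x10f2a3  head of `while` 2166 (ch = 2)   pass cs pcount         22  0x10f64c  head of `while` 2212 (ch > 2)   pass cs pcount
      16  0x10f2e6  before the i-loop 2183           pass cs pcount         23  0x10f692  before the i-loop 2229           pass cs pcount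
      10  0x10ef70  DECODE #1 (pass 0)                    cs pcount         17  0x10f314  DECODE #2 (pass 0)                    cs pcount
      28  0x10f7a5  head of the j-loop 2261 (pass 0)      cs pcount         29  0x10f8f8  after the j-loop 2261                 cs pcount
      30  0x10f914  head of the j-loop 2279        pass cs i pcount         34  0x10fa8d  latch of the i-loop 2278     pass cs i pcount
      32  0x10fa53  `done:`                                    —      36 37 38 39  the four trampolines that reload `temp_alloc_point`

  MEASURES (CONTRACTS `loops`): the pass loops `8 − pass`; the three `while (pcount < part_read)` and the three i-loops `PRD − pcount`
  (strict by R7b: `classwords ≥ 1`); the j-loops `ch − j` (inside one segment each). The packet measure `μ` (`Vorbis.mu`) is NOT a loop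
  measure here: it is only carried (`mu v.mem f ≤ mu e.mem f`).

  CONVENTIONS. Stack slots are addressed from the ENTRY stack pointer `e.rsp` (= RA, the address of the return-address slot):
  `[rbp − X]` is `e.rsp − (8 + X)`. 8-byte slots that hold an entry register are stated in the word form
  `UInt64.ofNat (v.mem.readLE a 8) = e.reg r` (the walker's rewrite rule), every other slot as a number `v.mem.readLE a k = n`.
  A 32-bit register holds its value zero-extended: `v.reg r = UInt64.ofNat n`.
-/
import Vorbis.Spec.Basic
import Vorbis.Spec.Alloc
import Vorbis.Spec.Reader
import Vorbis.Spec.Codebook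
import Vorbis.Spec.DecodeInv
import Vorbis.Invariant
import Vorbis.ArenaShadow
namespace Vorbis.Spec
open X86 X86.User Asan

namespace DecodeResidue

/-! ### The block predicate of a decode-time function that uses the temp allocator -/

/-- **Every allocated block is off the stack region and off the free part of the arena.** The two facts about `Blk` that a
decode-time function needs besides `BlkOK Blk` / `BlkLive Blk Live` (which are in `Env`): a push, a spill, a store into the own
protected frame is `StoreOK.off` by `offStack`; a store into the temp block (which lies in `[A.B + A.S, A.B + A.L)`: `ADOBusy`,
`ArenaOK.tblock_range`, AR2) is `StoreOK.off` by `offGap`. For the run's predicate `RunBlk A len = runBlk A (fixedBlocks len)`: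
`BlkFree.of_runBlk`; in decode_residue it is `Pre.free` (from `DecodeInv.offStack` / `DecodeInv.offGap`). -/
structure BlkFree (Blk : Block → Prop) (A : Arena) : Prop where
  /-- no allocated block meets the stack region `[700000H, 800000H)` -/
  offStack : ∀ B, Blk B → B.base + B.size ≤ 0x700000 ∨ 0x800000 ≤ B.base
  /-- no allocated block meets `[B + S, B + L)`: the setup blocks end at `B + S`, everything else is outside the arena -/
  offGap : ∀ B, Blk B → B.base + B.size ≤ A.B + A.S ∨ A.B + A.L ≤ B.base

/-- **The run's block predicate satisfies `BlkFree`**: a setup block ends at or below `B + S` (`ArenaOK.block_range`) and is off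
the stack (AR1x); the other objects are given off the stack and outside the arena (`fixed_off_stack`, `ArenaOK.other_outside`). -/
theorem BlkFree.of_runBlk {A : Arena} {others : List Obj} {mem : Mem} {f : Nat} (h : ArenaOK A others mem f)
    {extra : List Block}
    (hstack : ∀ C, C ∈ extra → C.base + C.size ≤ 0x700000 ∨ 0x800000 ≤ C.base)
    (hout : ∀ C, C ∈ extra → C.base + C.size ≤ A.B ∨ A.B + A.L ≤ C.base) :
    BlkFree (runBlk A extra) A := by
  constructor
  · intro B hB
    cases hB with
    | inl hs => exact h.blk_off_stack hs
    | inr hm => exact hstack B hm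
  · intro B hB
    cases hB with
    | inl hs =>
      have hr := h.block_range hs
      have hl := le_r8 B.size
      left
      omega
    | inr hm =>
      have ho := hout B hm
      omega

/-! ### The arguments: P1 and P2 of CONTRACTS -/

/-- **P1 and P2 of the precondition** (CONTRACTS 60): `rn` is a residue number, `n` is half a block size (`32 ≤ n`, `2·n ≤ blocksize_1`);
`0 ≤ ch ≤ channels`; the `8·ch` bytes at `residue_buffers` and the `ch` bytes at `do_not_decode` lie inside live objects AND on the
stack at or above `top` (= the caller's stack pointer: they are objects of the caller's protected frame, so nothing this function
writes meets them); for `i < ch`: `do_not_decode[i] = 0 ⇒ residue_buffers[i]` is one of the decoder's channel buffers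
(`Block(·, 4·blocksize_1)`, M6: a `SampleBuf.chan`), `do_not_decode[i] ≠ 0 ⇒ residue_buffers[i] = NULL`. -/
structure Args (others : List Obj) (frames : List (Nat × FrameLayout)) (mem : Mem) (f rb ch n rn dnd top : Nat) : Prop where
  /-- P1: `0 ≤ rn < residue_count` (MP6 in the caller) -/
  rn_lt : (rn : Int) < stb_vorbis.residue_count mem f
  /-- P1: `n ∈ {blocksize_0 / 2, blocksize_1 / 2}`, as the two bounds that are used -/
  n_ge : 32 ≤ n
  n_le : 2 * n ≤ bsize mem f 1
  /-- P2: `0 ≤ ch ≤ C` -/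
  ch_le : ch ≤ nchan mem f
  /-- P2: the pointer array is live … -/
  rb_live : LiveIn others frames rb (8 * ch)
  /-- … and the flag array is -/
  dnd_live : LiveIn others frames dnd ch
  /-- both lie on the stack at or above the caller's stack pointer -/
  rb_stack : top ≤ rb ∧ rb + 8 * ch ≤ 0x800000
  dnd_stack : top ≤ dnd ∧ dnd + ch ≤ 0x800000
  /-- P2: a channel that is decoded has one of the decoder's channel buffers, and the `4·blocksize_1` bytes of that buffer lie
  inside ONE live object (an arena block: `memset.spec` asks for `LiveIn`, which `BlkLive` — bytewise — does not give) -/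
  buf : ∀ i, i < ch → ¬ DND mem dnd i →
    ∃ c : Nat, (c : Int) < stb_vorbis.channels mem f ∧ mem.ptr (rb + 8 * i) = stb_vorbis.channel_buffers mem f c ∧
      LiveIn others frames (mem.ptr (rb + 8 * i)) (4 * bsize mem f 1)
  /-- P2: a channel that is not decoded has a NULL pointer -/
  null : ∀ i, i < ch → DND mem dnd i → mem.ptr (rb + 8 * i) = 0

/-! ### The precondition, the postcondition, the footprint -/

/-- **The precondition of `decode_residue(rdi = f, rsi = residue_buffers, edx = ch, ecx = n, r8d = rn, r9 = do_not_decode)`**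
(CONTRACTS 60) is LITERALLY "the decode-time invariant + the arguments": the shadow layer with the clean stack ending at the
caller's stack pointer (SH1–SH4); `DecodeInv` (Vorbis/Spec/DecodeInv.lean) of the entry memory for the decoder object in rdi — what
the one caller (vorbis_decode_packet_rest.9) holds at the call; P1 and P2. Everything CONTRACTS 60 lists besides — the environment
of a check site, the readers' environment, `BlkFree`, the arena above the text, OB1 + `VorbisOK f` (with `Bits f`, T1), SEP, the
codebooks apart from `*f`, ADO (`temps = []`, `T = L`, room for `tmr + 32`) — is a THEOREM below (`Pre.env` … `Pre.ado`), for the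
run's block predicate `RunBlk A len`. -/
structure Pre (len : Nat) (A : Arena) (others : List Obj) (frames : List (Nat × FrameLayout)) (stored room : Int)
    (ysz : Nat → Nat) (u : State) : Prop where
  /-- SH1–SH4: the shadow layer at a function's entry -/
  shadow : ShadowPre others frames u
  /-- THE DECODE-TIME INVARIANT of the entry memory, for `f = rdi` -/
  inv : DecodeInv others frames len A stored room ysz u.mem (u.reg .rdi).toNat
  /-- P1, P2: the six arguments (`top` = the caller's stack pointer = rsp + 8) -/
  args : Args others frames u.mem (u.reg .rdi).toNat (u.reg .rsi).toNat ((u.reg .rdx).toNat % 2 ^ 32)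
    ((u.reg .rcx).toNat % 2 ^ 32) ((u.reg .r8).toNat % 2 ^ 32) (u.reg .r9).toNat ((u.reg .rsp).toNat + 8)

namespace Pre
variable {len : Nat} {A : Arena} {others : List Obj} {frames : List (Nat × FrameLayout)} {stored room : Int}
  {ysz : Nat → Nat} {u : State}

/-! The clauses of CONTRACTS 60 that the invariant contains, under the names of the former fields. -/

/-- The environment of a check site at the entry: the shadow covers the live set, allocated blocks are lawful and live (FB's). -/
theorem env (h : Pre len A others frames stored room ysz u) :
    Env (RunBlk A len) (Live (stackObjs frames ++ others)) u.mem :=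
  h.inv.fb.env

/-- What the packet readers ask besides `Bits` (`Vorbis.Spec.ReaderEnv`, Vorbis/Spec/Common.lean): `*f` and the input each lie
inside ONE live object (`DecodeInv.readerEnv`). -/
theorem reader (h : Pre len A others frames stored room ysz u) :
    ReaderEnv others frames (RunBlk A len) len (u.reg .rdi).toNat :=
  h.inv.readerEnv

/-- Every allocated block is off the stack region and off the free part of the arena (`DecodeInv.offStack`, `.offGap`). -/
theorem free (h : Pre len A others frames stored room ysz u) : BlkFree (RunBlk A len) A :=
  ⟨h.inv.offStack, h.inv.offGap⟩

/-- The arena lies above the image's text (`Vorbis.Spec.ArenaPre.offText`, Vorbis/Spec/Alloc.lean: the allocator's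
precondition). -/
theorem arenaText (h : Pre len A others frames stored room ysz u) : L.textHi ≤ A.B :=
  h.inv.arenaText

/-- OB1 + `VorbisOK f` (with `Bits f`, T1) at the entry. -/
theorem vorbis (h : Pre len A others frames stored room ysz u) :
    Real.VorbisOK len (RunBlk A len) u.mem (u.reg .rdi).toNat :=
  h.inv.fb.vorbis

/-- SEP at the entry. -/
theorem sep (h : Pre len A others frames stored room ysz u) : Separated (RunBlk A len) u.mem (u.reg .rdi).toNat :=
  h.inv.sep

/-- What every decode through a codebook asks of the book's blocks (`Vorbis.Spec.BookApart`, Vorbis/Spec/Codebook.lean): the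
struct, the `sorted_values` block and the `codeword_lengths` block of every codebook are disjoint from `*f` — a theorem of CONFIG
and SEP (`DecodeInv.books`, `Separated.bookApart`). -/
theorem books (h : Pre len A others frames stored room ysz u) :
    ∀ i : Nat, (i : Int) < stb_vorbis.codebook_count u.mem (u.reg .rdi).toNat →
      BookApart u.mem (u.reg .rdi).toNat (stb_vorbis.codebooks_at u.mem (u.reg .rdi).toNat i) :=
  h.inv.books

/-- ADO at the entry: no temp block outstanding, `T = L`, room for `tmr + 32` (FB's). -/
theorem ado (h : Pre len A others frames stored room ysz u) : ADO A others u.mem (u.reg .rdi).toNat :=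
  h.inv.fb.ado

end Pre

/-- **The postcondition** (CONTRACTS 60): no return value. The shadow layer as at the entry — the SAME `others` (the temp block is
poisoned again: `dropObjs_cons_self`) and the own protected frame unpoisoned; THE DECODE-TIME INVARIANT again, for the SAME ghosts
and the memory at the return (so `VorbisOK f` with `Bits f`, SEP, ADO for the SAME ghost arena — `ADO.roundtrip`: `T = L`,
`temps = []`, `S` unchanged — : `Post.vorbis`, `Post.sep`, `Post.ado`); `μ` not increased. Segment 11 establishes it by
`Entered.post`. -/
structure Post (len : Nat) (A : Arena) (others : List Obj) (frames : List (Nat × FrameLayout)) (stored room : Int)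
    (ysz : Nat → Nat) (u v : State) : Prop where
  /-- the shadow layer of the caller, with the stack clean below the stack pointer after the `ret` -/
  shadow : ShadowInv others frames (v.reg .rsp).toNat v.mem
  /-- THE DECODE-TIME INVARIANT of the memory at the return, for the entry's `f` -/
  inv : DecodeInv others frames len A stored room ysz v.mem (u.reg .rdi).toNat
  /-- the packet measure is not increased -/
  mu_le : mu v.mem (u.reg .rdi).toNat ≤ mu u.mem (u.reg .rdi).toNat

namespace Post
variable {len : Nat} {A : Arena} {others : List Obj} {frames : List (Nat × FrameLayout)} {stored room : Int}
  {ysz : Nat → Nat} {u v : State}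

/-- `VorbisOK f` (with `Bits f`) at the return. -/
theorem vorbis (h : Post len A others frames stored room ysz u v) :
    Real.VorbisOK len (RunBlk A len) v.mem (u.reg .rdi).toNat :=
  h.inv.fb.vorbis

/-- SEP at the return. -/
theorem sep (h : Post len A others frames stored room ysz u v) : Separated (RunBlk A len) v.mem (u.reg .rdi).toNat :=
  h.inv.sep

/-- ADO at the return, for the SAME ghost arena and live list as at the entry. -/
theorem ado (h : Post len A others frames stored room ysz u v) : ADO A others v.mem (u.reg .rdi).toNat :=
  h.inv.fb.ado

end Post

/-- **The footprint besides the 848 bytes of stack** (CONTRACTS 60 `footprint`): the windows of `*f` that the bit reader, the paging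
code, `error` (`Reader.winsBits`, Vorbis/Spec/Reader.lean: `stream` · `p_first` · `eof error` · `last_page … page_flag bytes_in_seg` ·
`next_seg … known_loc_for_packet`) and the allocator (`temp_offset`) store to — each inside a decode-time hole; the free part of the arena (the one temp block and its red zone lie inside) and its shadow; the
shadow of the own protected frame (12 bytes: the prologue / epilogue pair); the channel buffers `channel_buffers[c][0, 4·b1)`,
`c < channels` (written: `residue_buffers[i][0 .. 2n)` for the decoded channels, which ARE channel buffers by P2). NOT written:
the configuration (residue records, classdata, residue_books, codebooks), the caller's two arrays. -/
def writes (A : Arena) (u : State) : List Span :=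
  [⟨(u.reg .rdi).toNat + 48, (u.reg .rdi).toNat + 56⟩,
   ⟨(u.reg .rdi).toNat + 84, (u.reg .rdi).toNat + 96⟩,
   ⟨(u.reg .rdi).toNat + 132, (u.reg .rdi).toNat + 144⟩,
   ⟨(u.reg .rdi).toNat + 1484, (u.reg .rdi).toNat + 1749⟩,
   ⟨(u.reg .rdi).toNat + 1752, (u.reg .rdi).toNat + 1784⟩,
   ⟨A.B + A.S, A.B + A.L⟩,
   shadowSpan (A.B + A.S) (A.B + A.L),
   shadowSpan ((u.reg .rsp).toNat - 152) ((u.reg .rsp).toNat - 56)]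
  ++ (List.range (nchan u.mem (u.reg .rdi).toNat)).map (fun c =>
      ⟨stb_vorbis.channel_buffers u.mem (u.reg .rdi).toNat c,
       stb_vorbis.channel_buffers u.mem (u.reg .rdi).toNat c + 4 * bsize u.mem (u.reg .rdi).toNat 1⟩)

end DecodeResidue

/-- **`decode_residue(rdi = f, rsi = residue_buffers, edx = ch, ecx = n, r8d = rn, r9 = do_not_decode)`** (CONTRACTS 60).
Ghosts: `len` (the input's length: `Bits`), `A` (the arena ghost; the block predicate is the run's, `RunBlk A len`), `others` /
`frames` (the live objects of the shadow layer), `stored` / `room` / `ysz` (the other ghosts of `DecodeInv`: decode_all's counters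
and the named `finalY` sizes, carried). Stack: own frame 264 bytes below the return address (six pushes, `sub rsp, 0xc8`, two more
pushes around each `codebook_decode_deinterleave_repeat` call), worst-case depth with callees 848. -/
def decode_residue.spec (len : Nat) (A : Arena) (others : List Obj) (frames : List (Nat × FrameLayout))
    (stored room : Int) (ysz : Nat → Nat) : Spec where
  pre u := DecodeResidue.Pre len A others frames stored room ysz u
  post u v := DecodeResidue.Post len A others frames stored room ysz u v
  frame := 848
  writes u := DecodeResidue.writes A u

@[vspec] theorem decode_residue.spec_frame (len : Nat) (A : Arena) (others : List Obj) (frames : List (Nat × FrameLayout))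
    (stored room : Int) (ysz : Nat → Nat) : (decode_residue.spec len A others frames stored room ysz).frame = 848 := id rfl

@[vspec] theorem decode_residue.spec_writes (len : Nat) (A : Arena) (others : List Obj) (frames : List (Nat × FrameLayout))
    (stored room : Int) (ysz : Nat → Nat) (u : State) :
    (decode_residue.spec len A others frames stored room ysz).writes u = DecodeResidue.writes A u := id rfl

namespace DecodeResidue

/-! ### The ghost bundle of one activation -/

/-- **The ghosts of one activation of decode_residue**: the Spec's ghost parameters, the state `e` at the function's first
instruction and the return address. A segment statement quantifies over ONE `g : G` (with `AtEntry … g.e` and `g.spec.pre g.e` as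
hypotheses); every number an assertion mentions is a function of `g`. -/
structure G where
  /-- the length of the input (`Bits`) -/
  len : Nat
  /-- the arena at the entry: ADO holds for it -/
  A : Arena
  /-- the live objects that are not stack objects, at the entry -/
  others : List Obj
  /-- the active protected frames of the callers -/
  frames : List (Nat × FrameLayout)
  /-- decode_all's counter `stored` (a ghost of `DecodeInv`: carried, never used) -/
  stored : Int
  /-- decode_all's counter `room` (a ghost of `DecodeInv`: carried, never used) -/
  room : Int
  /-- the size of the allocated block at `finalY[c]` (a ghost of `DecodeInv`: carried, never used) -/
  ysz : Nat → Nat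
  /-- the state at the function's first instruction -/
  e : State
  /-- the return address -/
  ret : Word

namespace G

/-- The function's `Spec` for these ghosts (an abbreviation: the `vspec` rules `decode_residue.spec_frame` / `_writes` see
through it). -/
abbrev spec (g : G) : Spec := decode_residue.spec g.len g.A g.others g.frames g.stored g.room g.ysz

/-- "is an allocated block": the run's block predicate for the arena and the input of this activation (a setup block of the arena
or one of the fixed objects). Every assertion says `g.Blk`. -/
def Blk (g : G) : Block → Prop := RunBlk g.A g.len

/-- `g.Blk` unfolded (a rewrite rule for a proof that needs the two cases of `RunBlk`). -/
theorem Blk_def (g : G) : g.Blk = RunBlk g.A g.len := id rfl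

/-- `f`, the decoder object (rdi). -/
def f (g : G) : Nat := (g.e.reg .rdi).toNat

/-- `residue_buffers` (rsi): the caller's array of 16 pointers. -/
def rb (g : G) : Nat := (g.e.reg .rsi).toNat

/-- `ch` (edx). -/
def ch (g : G) : Nat := (g.e.reg .rdx).toNat % 2 ^ 32

/-- `n` (ecx): half the block size. -/
def n (g : G) : Nat := (g.e.reg .rcx).toNat % 2 ^ 32

/-- `rn` (r8d): the residue number. -/
def rn (g : G) : Nat := (g.e.reg .r8).toNat % 2 ^ 32

/-- `do_not_decode` (r9): the caller's array of 256 flags. -/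
def dnd (g : G) : Nat := (g.e.reg .r9).toNat

/-- RA: the address of the return-address slot (rsp at the entry). `rbp = RA − 8`, the steady `rsp = RA − 248`. -/
def RA (g : G) : Nat := (g.e.reg .rsp).toNat

/-- `r = f->residue_config + rn`. -/
def r (g : G) : Nat := stb_vorbis.residue_config_at g.e.mem g.f g.rn

/-- `rtype = f->residue_types[rn]` (0, 1 or 2: R3). -/
def rtype (g : G) : Nat := stb_vorbis.residue_types g.e.mem g.f g.rn

/-- `C = f->channels`. -/
def C (g : G) : Nat := nchan g.e.mem g.f

/-- `W = classwords = f->codebooks[r->classbook].dimensions` (≥ 1: R7b). -/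
def W (g : G) : Nat := Residue.W g.e.mem g.f g.r

/-- `PRD = part_read = (min(end, A) − min(begin, A)) / part_size`, `A = actual_size = (rtype == 2 ? 2n : n)`. -/
def PRD (g : G) : Nat := Residue.partReadDec g.e.mem g.f g.rn g.n

/-- `sz = C·(8 + 8·PRD)`: the request of `temp_block_array(f, f->channels, part_read * sizeof(**part_classdata))`. -/
def sz (g : G) : Nat := g.C * (8 + 8 * g.PRD)

/-- The arena while the temp block is outstanding. -/
def A' (g : G) : Arena := g.A.pushTemp g.sz

/-- TB, the temp block `part_classdata`: `sz` bytes at `B + T'`, `T' = T − (r8 sz + 32)` (`= L − sz − 32` under ADO). -/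
def TB (g : G) : Block := ⟨g.A.B + (g.A.T - (r8 g.sz + 32)), g.sz⟩

/-- The live non-stack objects while the temp block is outstanding. -/
def others' (g : G) : List Obj := g.A.newTempObj g.sz :: g.others

/-- The active protected frames inside the function: its own frame (base `RA − 152`) pushed. -/
def frames' (g : G) : List (Nat × FrameLayout) := (g.RA - 152, Vorbis.Frames.decode_residue) :: g.frames

/-- The live set inside the function. -/
def Live' (g : G) : Nat → Prop := Live (stackObjs g.frames' ++ g.others')

/-- `&c_inter = rbp − 0x60`: the first object of the protected frame (`base + 48`). -/
def ci (g : G) : Nat := g.RA - 104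

/-- `&p_inter = rbp − 0x50`: the second object of the protected frame (`base + 64`). -/
def pi (g : G) : Nat := g.RA - 88

/-- `temp_alloc_point = f->temp_offset` at the entry `= L` (ADO: `T = L`). -/
def tap (g : G) : Nat := g.A.L

/-- Path A looks at row 0 of `part_classdata` only. -/
def rowsA (_g : G) : Nat → Prop := Vorbis.rowsA

/-- Path B looks at the rows `j < ch` with `do_not_decode[j] = 0` — read in the ENTRY memory (the caller's array is never
written: `Common.dnd_same`). -/
def rowsB (g : G) : Nat → Prop := Vorbis.rowsB g.e.mem g.dnd g.ch

end G

/-! ### The activation -/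

/-- **The two hypotheses about the activation that every segment statement has**: `g.e` is at the function's first instruction,
called (`AtEntry`: the return address `g.ret` at `[rsp]`, 848 bytes of stack room, the code, DF = 0 and the MXCSR masks), and the
function's precondition holds there (`pre` IS `(decode_residue.spec …).pre g.e`, unfolded). -/
structure Entered (u₀ : State) (g : G) : Prop where
  entry : AtEntry (conv u₀) L.decode_residue.entry
    (decode_residue.spec g.len g.A g.others g.frames g.stored g.room g.ysz).frame g.ret g.e
  pre : Pre g.len g.A g.others g.frames g.stored g.room g.ysz g.e

/-- `Entered.pre` is the Spec's precondition. -/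
theorem Entered.spec_pre {u₀ : State} {g : G} (h : Entered u₀ g) : g.spec.pre g.e := h.pre

namespace Entered
variable {u₀ : State} {g : G}

/-! The clauses of the precondition, spelled with the ghost bundle's names (`g.f`, `g.rb` …: definitionally what `Pre` says). -/

/-- THE DECODE-TIME INVARIANT at the entry. -/
theorem inv (he : Entered u₀ g) : DecodeInv g.others g.frames g.len g.A g.stored g.room g.ysz g.e.mem g.f := he.pre.inv
/-- `VorbisOK f` at the entry. -/
theorem vorbis (he : Entered u₀ g) : Real.VorbisOK g.len g.Blk g.e.mem g.f := he.pre.vorbis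
/-- SEP at the entry. -/
theorem sep (he : Entered u₀ g) : Separated g.Blk g.e.mem g.f := he.pre.sep
/-- ADO at the entry. -/
theorem ado (he : Entered u₀ g) : ADO g.A g.others g.e.mem g.f := he.pre.ado
/-- P1, P2. -/
theorem args (he : Entered u₀ g) : Args g.others g.frames g.e.mem g.f g.rb g.ch g.n g.rn g.dnd (g.RA + 8) := he.pre.args
/-- The readers' environment. -/
theorem reader (he : Entered u₀ g) : ReaderEnv g.others g.frames g.Blk g.len g.f := he.pre.reader
/-- The codebooks apart from `*f`. -/
theorem books (he : Entered u₀ g) : ∀ i : Nat, (i : Int) < stb_vorbis.codebook_count g.e.mem g.f →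
    BookApart g.e.mem g.f (stb_vorbis.codebooks_at g.e.mem g.f i) := he.pre.books
/-- The stack room: `700000H + 848 ≤ RA`, `RA + 8 ≤ 800000H`. -/
theorem room (he : Entered u₀ g) : 0x700000 + 848 ≤ g.RA ∧ g.RA + 8 ≤ 0x800000 := by
  have h1 := he.entry.room
  have h2 := he.entry.top
  simp only [vspec, conv_stackLo, conv_stackHi] at h1 h2
  exact ⟨h1, h2⟩

/-- **The caller's array `residue_buffers` is disjoint from `*f`**: the clause `DeintApart.tableObj` of
codebook_decode_deinterleave_repeat's precondition at both call sites (0x10f18e in segment .4, 0x10f538 in segment .6: there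
rdx = `[rbp−0xd0]` = `g.rb` (`Common.fr_rb`), ecx = `[rbp−0x94]` = `g.ch` (`Common.fr_ch`), rdi = `g.f`). The array lies on the
stack at or above the caller's stack pointer (P2: `Args.rb_stack`, with the stack room `Entered.room`), `*f` is an arena block off
the stack region (`DecodeInv.objOff`). -/
theorem deint_tableObj (he : Entered u₀ g) : (Block.mk g.rb (8 * g.ch)).disjoint (objBlock g.f) := by
  have hroom := he.room
  have hstack := he.args.rb_stack
  have hobj := he.inv.objOff
  simp only [vblock, Off.sizeof.stb_vorbis] at hobj ⊢
  simp only [G.RA] at hroom hstack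
  omega

end Entered


/-! ### THE FRAME OF A SEGMENT: everything the contract may write is a legal decode-time store

The footprint of the contract (`g.spec.footprint g.e`: the 848 bytes of stack, five windows of `*f`, the free part of the arena and
its shadow, the own frame's shadow, the channel buffers) consists of `StoreOK` spans. So for ANY memory `m` that differs from the
entry memory inside the footprint only — `Common.same` of every cut point; the walker's `u_same` at a segment's exit — the CONFIG
part of the invariant, SEP and `DecodeSame` hold in `m` (`ConfigOK.frame_stores`), and with `Bits` of `m` the whole `VorbisOK`:
`Entered.frame`. A worker re-establishes by hand only what its segment really changes (`Bits`, `ADOBusy`, TB, FILL, CI). -/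

/-- A span of the contract's footprint is the stack frame, one of the five windows of `*f`, or a span that does not meet `*f`. -/
theorem Entered.footprint_cases {u₀ : State} {g : G} (he : Entered u₀ g) (s : Span) (hs : s ∈ g.spec.footprint g.e) :
    (s = ⟨g.f + 48, g.f + 56⟩ ∨ s = ⟨g.f + 84, g.f + 96⟩ ∨ s = ⟨g.f + 132, g.f + 144⟩ ∨ s = ⟨g.f + 1484, g.f + 1749⟩ ∨
      s = ⟨g.f + 1752, g.f + 1784⟩) ∨
    StoreOK g.Blk g.e.mem g.f s ∧ (g.f + 1808 ≤ s.lo ∨ s.hi ≤ g.f) := by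
  have hpre := he.pre
  have hok := hpre.env.ok
  have hob : g.Blk (objBlock g.f) := hpre.vorbis.obj
  have hobin := hok.inside _ hob
  have hobst := hpre.free.offStack _ hob
  have hobgap := hpre.free.offGap _ hob
  simp only [vblock, voff] at hobin hobst hobgap
  have ef : (g.e.reg .rdi).toNat = g.f := rfl
  have hroom := he.entry.room
  have htop := he.entry.top
  simp only [vspec, conv_stackLo, conv_stackHi] at hroom htop
  unfold Spec.footprint at hs
  rcases List.mem_cons.mp hs with rfl | hs
  · -- the 848 bytes of stack
    right
    constructor
    · apply StoreOK.off
      intro B hB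
      have := hpre.free.offStack B hB
      show B.base + B.size ≤ (g.e.reg .rsp).toNat - 848 ∨ (g.e.reg .rsp).toNat ≤ B.base
      omega
    · show g.f + 1808 ≤ (g.e.reg .rsp).toNat - 848 ∨ (g.e.reg .rsp).toNat ≤ g.f
      omega
  · have hs' : s ∈ DecodeResidue.writes g.A g.e := hs
    unfold DecodeResidue.writes at hs'
    rcases List.mem_append.mp hs' with hfix | hbuf
    · simp only [List.mem_cons, List.mem_nil_iff, or_false] at hfix
      rcases hfix with rfl | rfl | rfl | rfl | rfl | rfl | rfl | rfl
      · exact Or.inl (Or.inl rfl)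
      · exact Or.inl (Or.inr (Or.inl rfl))
      · exact Or.inl (Or.inr (Or.inr (Or.inl rfl)))
      · exact Or.inl (Or.inr (Or.inr (Or.inr (Or.inl rfl))))
      · exact Or.inl (Or.inr (Or.inr (Or.inr (Or.inr rfl))))
      · -- the free part of the arena
        right
        constructor
        · apply StoreOK.off
          intro B hB
          exact hpre.free.offGap B hB
        · show g.f + 1808 ≤ g.A.B + g.A.S ∨ g.A.B + g.A.L ≤ g.f
          omega
      · -- its shadow
        right
        constructor
        · apply StoreOK.off
          intro B hB
          have := hok.inside B hB
          unfold shadowSpan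
          simp only []
          omega
        · unfold shadowSpan
          simp only []
          omega
      · -- the shadow of the own frame
        right
        constructor
        · apply StoreOK.off
          intro B hB
          have := hok.inside B hB
          unfold shadowSpan
          simp only []
          omega
        · unfold shadowSpan
          simp only []
          omega
    · -- a channel buffer
      obtain ⟨c, hc, rfl⟩ := List.mem_map.mp hbuf
      have hc' : c < nchan g.e.mem g.f := List.mem_range.mp hc
      have hcint : (c : Int) < stb_vorbis.channels g.e.mem g.f := by
        rw [nchan_def] at hc'
        omega
      have hC : SampleBuf g.Blk g.e.mem g.f ⟨stb_vorbis.channel_buffers g.e.mem g.f c, 4 * bsize g.e.mem g.f 1⟩ :=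
        SampleBuf.chan c hcint
      right
      constructor
      · exact StoreOK.buffer _ hC (Nat.le_refl _) (Nat.le_refl _)
      · have hd := hpre.sep.bufobj _ hC
        simp only [vblock, voff] at hd
        show g.f + 1808 ≤ stb_vorbis.channel_buffers g.e.mem g.f c ∨
          stb_vorbis.channel_buffers g.e.mem g.f c + 4 * bsize g.e.mem g.f 1 ≤ g.f
        omega

/-- **Every span of the contract's footprint is a legal decode-time store** (`StoreOK`: a hole of `*f`, a sample buffer, or off
every allocated block). -/
theorem Entered.footprint_storeOK {u₀ : State} {g : G} (he : Entered u₀ g) :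
    ∀ s, s ∈ g.spec.footprint g.e → StoreOK g.Blk g.e.mem g.f s := by
  intro s hs
  rcases he.footprint_cases s hs with hwin | hoff
  · apply StoreOK.hole
    unfold InHole
    have ef : (g.e.reg .rdi).toNat = g.f := rfl
    rcases hwin with rfl | rfl | rfl | rfl | rfl <;> simp only [] <;> omega
  · exact hoff.1

/-- **The fields of `*f` outside the five windows read as at the entry**, in any memory that differs from the entry memory inside
the footprint only: `ws` is any list of windows of `*f` none of which meets `[48,56) [84,96) [132,144) [1484,1749) [1752,1784)`
(for concrete windows both side conditions are `by decide`). -/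
theorem Entered.objEq {u₀ : State} {g : G} (he : Entered u₀ g) {m : Mem}
    (hs : Mem.SameExcept (g.spec.footprint g.e) g.e.mem m) (ws : Wins) (hbelow : WinsBelow ws 1808)
    (hoff : ∀ w, w ∈ ws → (w.2 ≤ 48 ∨ 56 ≤ w.1) ∧ (w.2 ≤ 84 ∨ 96 ≤ w.1) ∧ (w.2 ≤ 132 ∨ 144 ≤ w.1) ∧
      (w.2 ≤ 1484 ∨ 1749 ≤ w.1) ∧ (w.2 ≤ 1752 ∨ 1784 ≤ w.1)) : ObjEq ws g.e.mem g.f m g.f := by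
  have hob : g.Blk (objBlock g.f) := he.pre.vorbis.obj
  have hobin := he.pre.env.ok.inside _ hob
  simp only [vblock, voff] at hobin
  have ef : (g.e.reg .rdi).toNat = g.f := rfl
  apply ObjEq.of_sameExcept hs
  · intro w hw
    have := hbelow w hw
    omega
  · intro w hw s hsp
    have hb := hbelow w hw
    obtain ⟨h1, h2, h3, h4, h5⟩ := hoff w hw
    rcases he.footprint_cases s hsp with hwin | hout
    · rcases hwin with rfl | rfl | rfl | rfl | rfl <;> simp only [] <;> omega
    · have := hout.2
      omega

/-- **THE FRAME OF A SEGMENT.** A memory `m` that differs from the entry memory inside the contract's footprint only, with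
`Bits` of `m` (the one group the function's callees re-establish: `ReaderPost.bits`): `VorbisOK f` and SEP hold in `m`, and `*f`
is as at the entry outside its decode-time holes. M7 and W1 read fields the footprint does not contain. -/
theorem Entered.frame {u₀ : State} {g : G} (he : Entered u₀ g) {m : Mem}
    (hs : Mem.SameExcept (g.spec.footprint g.e) g.e.mem m) (hb : Bits g.Blk g.len m g.f) :
    Real.VorbisOK g.len g.Blk m g.f ∧ Separated g.Blk m g.f ∧ DecodeSame g.f g.e.mem m := by
  have hv := he.pre.vorbis
  have h7 : Mdct.M7Range m g.f := by
    have h := hv.buffers.M7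
    exact h.transfer (he.objEq hs Mdct.M7Range.wins (by decide) (by decide))
  have hw1 : W1 m g.f := hv.w1.transfer (he.objEq hs W1.wins (by decide) (by decide))
  have hd : DecodeSame g.f g.e.mem m :=
    StoreOK.decodeSame he.pre.env.ok hv.obj he.pre.sep hs he.footprint_storeOK
  obtain ⟨h1, h2⟩ := Real.VorbisOK.frame_stores hv he.pre.env.ok he.pre.sep hs he.footprint_storeOK
    (fun _ => hb) (fun _ => h7) (fun _ => hw1)
  exact ⟨h1, h2, hd⟩

/-- **THE POSTCONDITION FROM WHAT SEGMENT 11 REALLY ESTABLISHES.** At the state `v` after the `ret` a worker shows: the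
footprint (`u_same` + `Common.same` of the segment's entry), the caller's shadow layer (`ShadowInv.epilogue_ra` after
`arena_temp_restore` has poisoned the temp block again), `Bits` of the memory (`Common.point.vorbis.bits`, carried over the
epilogue), ADO for the entry's ghost arena and live list (`arena_temp_restore`'s post with `ADO.roundtrip`) and `μ`. The
decode-time invariant at the return follows by `DecodeInv.frame_stores` from the one at the entry: every span of the footprint is
a legal decode-time store (`Entered.footprint_storeOK`); the environment of a check site is the exit's `Covers` with the entry's
`BlkOK` / `BlkLive` (memory-independent); M7 and W1 read fields of `*f` that the footprint does not contain. -/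
theorem Entered.post {u₀ : State} {g : G} (he : Entered u₀ g) {v : State}
    (same : Mem.SameExcept (g.spec.footprint g.e) g.e.mem v.mem)
    (shadow : ShadowInv g.others g.frames (v.reg .rsp).toNat v.mem)
    (bits : Bits g.Blk g.len v.mem g.f)
    (ado : ADO g.A g.others v.mem g.f)
    (mu_le : mu v.mem g.f ≤ mu g.e.mem g.f) : g.spec.post g.e v := by
  have hinv := he.inv
  have hv := he.vorbis
  have h7 : Mdct.M7Range v.mem g.f := by
    have h := hv.buffers.M7
    exact h.transfer (he.objEq same Mdct.M7Range.wins (by decide) (by decide))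
  have hw1 : W1 v.mem g.f := hv.w1.transfer (he.objEq same W1.wins (by decide) (by decide))
  have henv : Env g.Blk (Live (stackObjs g.frames ++ g.others)) v.mem :=
    ⟨shadow.covers, hinv.ok, hinv.live⟩
  have hinv' : DecodeInv g.others g.frames g.len g.A g.stored g.room g.ysz v.mem g.f :=
    hinv.frame_stores same he.footprint_storeOK henv ado (fun _ => bits) (fun _ => h7) (fun _ => hw1)
  exact ⟨shadow, hinv', mu_le⟩

/-- **No span of the contract's footprint meets the stack at or above the return address**: the caller's frame (its two arrays,
the return address itself) is not written. -/
theorem Entered.footprint_stack {u₀ : State} {g : G} (he : Entered u₀ g) (s : Span) (hs : s ∈ g.spec.footprint g.e) :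
    s.hi ≤ g.RA ∨ s.hi ≤ 0x700000 ∨ 0x800000 ≤ s.lo := by
  have hok := he.pre.env.ok
  have hob : g.Blk (objBlock g.f) := he.vorbis.obj
  have hobst := he.pre.free.offStack _ hob
  simp only [vblock, voff] at hobst
  have ef : (g.e.reg .rdi).toNat = g.f := rfl
  have eR : (g.e.reg .rsp).toNat = g.RA := rfl
  have h1x := he.ado.ok.AR1x
  have h2 := he.ado.ok.AR2
  unfold Spec.footprint at hs
  rcases List.mem_cons.mp hs with rfl | hs
  · left
    show (g.e.reg .rsp).toNat ≤ g.RA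
    omega
  · have hs' : s ∈ DecodeResidue.writes g.A g.e := hs
    unfold DecodeResidue.writes at hs'
    simp only [ef] at hs'
    right
    rcases List.mem_append.mp hs' with hfix | hbuf
    · simp only [List.mem_cons, List.mem_nil_iff, or_false] at hfix
      rcases hfix with rfl | rfl | rfl | rfl | rfl | rfl | rfl | rfl
      · simp only []
        omega
      · simp only []
        omega
      · simp only []
        omega
      · simp only []
        omega
      · simp only []
        omega
      · simp only []
        omega
      · unfold shadowSpan
        simp only []
        omega
      · unfold shadowSpan
        simp only []
        omega
    · obtain ⟨c, hc, rfl⟩ := List.mem_map.mp hbuf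
      have hc' : c < nchan g.e.mem g.f := List.mem_range.mp hc
      have hcint : (c : Int) < stb_vorbis.channels g.e.mem g.f := by
        rw [nchan_def] at hc'
        omega
      have hB : g.Blk ⟨stb_vorbis.channel_buffers g.e.mem g.f c, 4 * bsize g.e.mem g.f 1⟩ :=
        SampleBuf.blk he.vorbis.config (SampleBuf.chan c hcint)
      have := he.pre.free.offStack _ hB
      simp only [] at this ⊢
      omega

/-- **The residue record, the class book's header and the caller's two arrays read as at the entry** in any memory that differs
from the entry memory inside the footprint only: the `reads`, `dnd_same`, `rb_same` fields of `Common` need no proof of their own. -/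
theorem Entered.reads {u₀ : State} {g : G} (he : Entered u₀ g) {m : Mem}
    (hs : Mem.SameExcept (g.spec.footprint g.e) g.e.mem m) :
    ResidueReads g.e.mem g.f m g.f g.r ∧
    (∀ j, j < g.ch → m.u8 (g.dnd + j) = g.e.mem.u8 (g.dnd + j)) ∧
    (∀ j, j < g.ch → m.ptr (g.rb + 8 * j) = g.e.mem.ptr (g.rb + 8 * j)) := by
  have hcfg := he.vorbis.config
  have hk := StoreOK.reads_kept hcfg he.pre.env.ok he.sep hs he.footprint_storeOK
  have hR : ResidueOK g.Blk g.e.mem g.f := he.vorbis.residue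
  have hargs := he.args
  have hrec : ResidueAtOK g.Blk g.e.mem g.f g.r := hR.record g.rn hargs.rn_lt
  have hroom := he.room
  refine ⟨?_, ?_, ?_⟩
  · apply ResidueReads.of_kept (he.objEq hs ResidueAtOK.wins (by decide) (by decide))
    · -- the record lies in the `residue_config` block
      have hcb := hk _ (ConfigOK.Reads.residue ResidueOK.Owns.config)
      have hlt := hargs.rn_lt
      have h1 := hR.R1
      have hlt' : g.rn < (stb_vorbis.residue_count g.e.mem g.f).toNat := by omega
      apply hcb.mono
      · show stb_vorbis.residue_config g.e.mem g.f ≤ g.r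
        unfold G.r stb_vorbis.residue_config_at
        omega
      · show g.r + Off.sizeof.Residue ≤
          stb_vorbis.residue_config g.e.mem g.f + Off.sizeof.Residue * (stb_vorbis.residue_count g.e.mem g.f).toNat
        unfold G.r stb_vorbis.residue_config_at
        simp only [voff]
        omega
    · -- the class book's header lies in the codebooks block
      have hcb := hk _ ConfigOK.Reads.codebooks
      have h7 := hrec.R7
      have hlt' : Residue.classbook g.e.mem g.r < (stb_vorbis.codebook_count g.e.mem g.f).toNat := by omega
      apply hcb.mono
      · show stb_vorbis.codebooks g.e.mem g.f ≤ Residue.cbk g.e.mem g.f g.r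
        unfold Residue.cbk stb_vorbis.codebooks_at
        omega
      · show Residue.cbk g.e.mem g.f g.r + 8 ≤
          stb_vorbis.codebooks g.e.mem g.f + Off.sizeof.Codebook * (stb_vorbis.codebook_count g.e.mem g.f).toNat
        unfold Residue.cbk stb_vorbis.codebooks_at
        simp only [voff]
        omega
  · -- the flag array: on the stack above the frame
    intro j hj
    have hst := hargs.dnd_stack
    have e : (addr (g.dnd + j)).toNat = g.dnd + j := toNat_addr _ (by omega)
    unfold Mem.u8
    apply hs.readLE _ _ (by rw [e]; omega)
    intro w hw
    have := he.footprint_stack w hw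
    rw [e]
    omega
  · -- the pointer array
    intro j hj
    have hst := hargs.rb_stack
    have e : (addr (g.rb + 8 * j)).toNat = g.rb + 8 * j := toNat_addr _ (by omega)
    unfold Mem.ptr Mem.u64
    apply hs.readLE _ _ (by rw [e]; omega)
    intro w hw
    have := he.footprint_stack w hw
    rw [e]
    omega

/-- **The codebooks stay apart from `*f`** (S3's `BookApart`: the precondition of every decode through a codebook) in any memory
that differs from the entry memory inside the footprint only: the CONFIG part of the invariant and SEP hold in that memory
(`ConfigOK.frame_stores` over the footprint's `StoreOK` spans: no `Bits` is needed), and `BookApart` of every codebook is a theorem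
of the two (`Separated.bookApart`). -/
theorem Entered.bookApart {u₀ : State} {g : G} (he : Entered u₀ g) {m : Mem}
    (hs : Mem.SameExcept (g.spec.footprint g.e) g.e.mem m) (i : Nat)
    (hi : (i : Int) < stb_vorbis.codebook_count m g.f) :
    BookApart m g.f (stb_vorbis.codebooks_at m g.f i) := by
  have hcfg : ConfigOK g.Blk g.e.mem g.f := he.vorbis.config
  have hob : g.Blk (objBlock g.f) := he.vorbis.obj
  obtain ⟨hcfg', hsep', _⟩ := hcfg.frame_stores he.pre.env.ok hob he.sep hs he.footprint_storeOK
  exact hsep'.bookApart hcfg' i hi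

/-- The readers' environment inside the function: the live lists have grown. -/
theorem Entered.reader' {u₀ : State} {g : G} (he : Entered u₀ g) : ReaderEnv g.others' g.frames' g.Blk g.len g.f := by
  apply he.reader.mono
  intro o ho
  unfold G.frames' G.others'
  rw [stackObjs_cons]
  rcases List.mem_append.mp ho with h | h
  · exact List.mem_append_left _ (List.mem_append_right _ h)
  · exact List.mem_append_right _ (List.mem_cons_of_mem _ h)

/-- No live non-stack object inside the function lies in the image's text (`ShadowPre.offText` of every callee): the temp block
is in the arena, above the text. -/
theorem Entered.offText' {u₀ : State} {g : G} (he : Entered u₀ g) : ∀ o, o ∈ g.others' → L.textHi ≤ o.base := by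
  intro o ho
  rcases List.mem_cons.mp ho with rfl | h
  · have := he.pre.arenaText
    show L.textHi ≤ g.A.B + (g.A.T - (r8 g.sz + 32))
    omega
  · exact he.pre.shadow.offText o h

/-! ### COMMON: what holds at every cut point after the allocation -/

/-- **COMMON := FR ∧ ENV** of CONTRACTS 60 `defs`, at a state `v` at a cut point between the allocation and `done:`.
`u₀` is the reference state of the statement (the image's text). -/
structure Common (u₀ : State) (g : G) (v : State) : Prop where
  /-- FR: `rbp = RA − 8` -/
  rbp : v.reg .rbp = g.e.reg .rsp - 8
  /-- the steady stack pointer `rbp − 0xf0` -/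
  rsp : v.reg .rsp = g.e.reg .rsp - 248
  /-- the image's text is unchanged -/
  code : CodeOK u₀ v.mem
  /-- DF = 0, the SSE exceptions masked -/
  inv : abiInv v
  /-- the six saved registers: `[rbp]`, `[rbp−8]` … `[rbp−0x28]` -/
  s_rbp : UInt64.ofNat (v.mem.readLE (g.e.reg .rsp - 8) 8) = g.e.reg .rbp
  s_r15 : UInt64.ofNat (v.mem.readLE (g.e.reg .rsp - 16) 8) = g.e.reg .r15
  s_r14 : UInt64.ofNat (v.mem.readLE (g.e.reg .rsp - 24) 8) = g.e.reg .r14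
  s_r13 : UInt64.ofNat (v.mem.readLE (g.e.reg .rsp - 32) 8) = g.e.reg .r13
  s_r12 : UInt64.ofNat (v.mem.readLE (g.e.reg .rsp - 40) 8) = g.e.reg .r12
  s_rbx : UInt64.ofNat (v.mem.readLE (g.e.reg .rsp - 48) 8) = g.e.reg .rbx
  /-- FR: `[rbp−0xb0] = f` -/
  fr_f : UInt64.ofNat (v.mem.readLE (g.e.reg .rsp - 184) 8) = g.e.reg .rdi
  /-- FR: `[rbp−0xd0] = residue_buffers` -/
  fr_rb : UInt64.ofNat (v.mem.readLE (g.e.reg .rsp - 216) 8) = g.e.reg .rsi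
  /-- FR: `[rbp−0x94] = ch` (4 bytes) -/
  fr_ch : v.mem.readLE (g.e.reg .rsp - 156) 4 = g.ch
  /-- FR: `[rbp−0xbc] = part_read` (4 bytes) -/
  fr_prd : v.mem.readLE (g.e.reg .rsp - 196) 4 = g.PRD
  /-- FR: `[rbp−0xc0] = classwords` (4 bytes) -/
  fr_w : v.mem.readLE (g.e.reg .rsp - 200) 4 = g.W
  /-- FR: `[rbp−0xe0] = rtype` (4 bytes) -/
  fr_rtype : v.mem.readLE (g.e.reg .rsp - 232) 4 = g.rtype
  /-- FR: `[rbp−0xa8] = part_classdata` = the base of the temp block -/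
  fr_pcd : v.mem.readLE (g.e.reg .rsp - 176) 8 = g.TB.base
  /-- FR: `[rbp−0xe8] = (rbp − 0x90) >> 3`: the granule index of the protected frame's base -/
  fr_si : v.mem.readLE (g.e.reg .rsp - 240) 8 = (g.RA - 152) / 8
  /-- what has been written so far lies in the contract's footprint -/
  same : Mem.SameExcept (g.spec.footprint g.e) g.e.mem v.mem
  /-- the shadow layer: the own frame is the innermost protected frame (`c_inter`, `p_inter` are live), the temp block is a
  live object, the stack is clean below the steady stack pointer -/
  shadow : ShadowInv g.others' g.frames' (g.RA - 248) v.mem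
  /-- the decoder invariant with ONE temp block of `sz` bytes outstanding (`Env`, `VorbisOK`, `ADOBusy`) -/
  point : Real.InFrame g.len (g.A', g.others') g.Blk g.Live' v.mem g.f g.sz
  /-- SEP -/
  sep : Separated g.Blk v.mem g.f
  /-- TB: the row-pointer table that make_block_array built -/
  tb : TempRows v.mem g.TB g.C g.PRD
  /-- `*f` is as at the entry outside its decode-time holes: `channels`, `codebooks`, `residue_config`, `residue_types`,
  `channel_buffers`, `blocksize_1` … read the same -/
  obj : DecodeSame g.f g.e.mem v.mem
  /-- the residue record and the class book's header read as at the entry: `begin end part_size classifications classbook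
  classdata residue_books`, `E`, `W` -/
  reads : ResidueReads g.e.mem g.f v.mem g.f g.r
  /-- the caller's flag array is as at the entry -/
  dnd_same : ∀ j, j < g.ch → v.mem.u8 (g.dnd + j) = g.e.mem.u8 (g.dnd + j)
  /-- the caller's pointer array is as at the entry -/
  rb_same : ∀ j, j < g.ch → v.mem.ptr (g.rb + 8 * j) = g.e.mem.ptr (g.rb + 8 * j)
  /-- μ not increased -/
  mu_le : mu v.mem g.f ≤ mu g.e.mem g.f


/-- **The live set inside the function contains the entry's**: the own frame's objects and the temp block were added. -/
theorem G.live_mono (g : G) : ∀ x, Live (stackObjs g.frames ++ g.others) x → g.Live' x := by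
  intro x hx
  obtain ⟨o, ho, hb⟩ := hx
  refine ⟨o, ?_, hb⟩
  unfold G.frames' G.others'
  rw [stackObjs_cons]
  rcases List.mem_append.mp ho with h | h
  · exact List.mem_append_left _ (List.mem_append_right _ h)
  · exact List.mem_append_right _ (List.mem_cons_of_mem _ h)

/-- **COMMON FROM WHAT A SEGMENT REALLY ESTABLISHES.** At an exit a worker shows: the frame facts (registers, the six saved
registers, the eight constant slots), the footprint (`u_same` + `Common.same` of the entry), the shadow layer, `Bits` of the new
memory (a callee's `ReaderPost.bits`, or `Bits.update` after the inline DECODE), `ADOBusy` (`ADOBusy.transfer`: the arena fields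
and `temp_memory_required` are not stored to after segment 1), TB (`TempRows.frame` / `.store_slot`) and `μ`. The rest — the
check-site environment, the CONFIG part of `VorbisOK` with M7 and W1, SEP, `DecodeSame`, the record's reads, the caller's two
arrays — follows from the footprint alone (`Entered.frame`, `Entered.reads`). -/
theorem Common.of_frame {u₀ : State} {g : G} (he : Entered u₀ g) {v : State}
    (rbp : v.reg .rbp = g.e.reg .rsp - 8) (rsp : v.reg .rsp = g.e.reg .rsp - 248)
    (code : CodeOK u₀ v.mem) (inv : abiInv v)
    (s_rbp : UInt64.ofNat (v.mem.readLE (g.e.reg .rsp - 8) 8) = g.e.reg .rbp)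
    (s_r15 : UInt64.ofNat (v.mem.readLE (g.e.reg .rsp - 16) 8) = g.e.reg .r15)
    (s_r14 : UInt64.ofNat (v.mem.readLE (g.e.reg .rsp - 24) 8) = g.e.reg .r14)
    (s_r13 : UInt64.ofNat (v.mem.readLE (g.e.reg .rsp - 32) 8) = g.e.reg .r13)
    (s_r12 : UInt64.ofNat (v.mem.readLE (g.e.reg .rsp - 40) 8) = g.e.reg .r12)
    (s_rbx : UInt64.ofNat (v.mem.readLE (g.e.reg .rsp - 48) 8) = g.e.reg .rbx)
    (fr_f : UInt64.ofNat (v.mem.readLE (g.e.reg .rsp - 184) 8) = g.e.reg .rdi)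
    (fr_rb : UInt64.ofNat (v.mem.readLE (g.e.reg .rsp - 216) 8) = g.e.reg .rsi)
    (fr_ch : v.mem.readLE (g.e.reg .rsp - 156) 4 = g.ch)
    (fr_prd : v.mem.readLE (g.e.reg .rsp - 196) 4 = g.PRD)
    (fr_w : v.mem.readLE (g.e.reg .rsp - 200) 4 = g.W)
    (fr_rtype : v.mem.readLE (g.e.reg .rsp - 232) 4 = g.rtype)
    (fr_pcd : v.mem.readLE (g.e.reg .rsp - 176) 8 = g.TB.base)
    (fr_si : v.mem.readLE (g.e.reg .rsp - 240) 8 = (g.RA - 152) / 8)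
    (same : Mem.SameExcept (g.spec.footprint g.e) g.e.mem v.mem)
    (shadow : ShadowInv g.others' g.frames' (g.RA - 248) v.mem)
    (bits : Bits g.Blk g.len v.mem g.f)
    (busy : ADOBusy g.A' g.others' v.mem g.f g.sz)
    (tb : TempRows v.mem g.TB g.C g.PRD)
    (mu_le : mu v.mem g.f ≤ mu g.e.mem g.f) : Common u₀ g v := by
  obtain ⟨hv, hsep, hd⟩ := he.frame same bits
  obtain ⟨hrd, hdnd, hrb⟩ := he.reads same
  have henv : Env g.Blk g.Live' v.mem :=
    ⟨shadow.covers, he.pre.env.ok, BlkLive.mono he.pre.env.live g.live_mono⟩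
  exact ⟨rbp, rsp, code, inv, s_rbp, s_r15, s_r14, s_r13, s_r12, s_rbx, fr_f, fr_rb, fr_ch, fr_prd, fr_w, fr_rtype, fr_pcd,
    fr_si, same, shadow, ⟨henv, hv, busy⟩, hsep, tb, hd, hrd, hdnd, hrb, mu_le⟩

namespace Common
variable {u₀ : State} {g : G} {v : State}

/-! #### What COMMON gives at once (for every segment's worker) -/

/-- The residue number is below `residue_count` in the present memory. -/
theorem rn_lt (he : Entered u₀ g) (c : Common u₀ g v) : (g.rn : Int) < stb_vorbis.residue_count v.mem g.f := by
  have h := he.pre.args.rn_lt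
  have e : stb_vorbis.residue_count v.mem g.f = stb_vorbis.residue_count g.e.mem g.f := by
    simp only [vacc, voff]
    exact c.obj.i32 320 (by decide)
  rw [e]
  exact h

/-- The record's address is the one computed at the entry. -/
theorem config_at (c : Common u₀ g v) : stb_vorbis.residue_config_at v.mem g.f g.rn = g.r := by
  have e : stb_vorbis.residue_config v.mem g.f = stb_vorbis.residue_config g.e.mem g.f := by
    simp only [vacc, voff]
    exact c.obj.u64 456 (by decide)
  unfold G.r stb_vorbis.residue_config_at
  rw [e]

/-- **R4 – R8b of THE record, in the present memory**: every check site of the record's fields, of `classdata`, of its rows,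
of `residue_books`, and fact K (`Residue.factK`) start here. -/
theorem resAt (he : Entered u₀ g) (c : Common u₀ g v) : ResidueAtOK g.Blk v.mem g.f g.r := by
  have hr : ResidueOK g.Blk v.mem g.f := c.point.vorbis.residue
  have h := hr.record g.rn (c.rn_lt he)
  rw [c.config_at] at h
  exact h

/-- `residue_types[rn]` is the `rtype` of the entry. -/
theorem rtype_eq (he : Entered u₀ g) (c : Common u₀ g v) : stb_vorbis.residue_types v.mem g.f g.rn = g.rtype := by
  have hR : ResidueOK g.Blk g.e.mem g.f := he.pre.vorbis.residue
  have hlt := hR.index_lt g.rn he.pre.args.rn_lt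
  unfold G.rtype
  simp only [vacc, voff]
  have hw : InWins decodeWins (324 + 2 * g.rn) 2 := by
    apply InWins.of_mem (144, 1000) (by decide)
    · show 144 ≤ 324 + 2 * g.rn
      omega
    · show 324 + 2 * g.rn + 2 ≤ 1000
      omega
  exact c.obj.u16_at (324 + 2 * g.rn) hw (by omega) (by omega)

/-- **`part_read`, recomputed in the present memory, is the `PRD` of the entry** (the hypothesis `hpc` of `Residue.factK`,
`factK_buffer`, `factK_pos` is `pc < g.PRD` after this rewrite). -/
theorem prd (c : Common u₀ g v) :
    Residue.partRead v.mem g.r (Res.actualDec g.rtype g.n) = g.PRD := by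
  unfold G.PRD Residue.partReadDec Residue.partRead
  rw [c.reads.begin, c.reads.end_, c.reads.part_size]
  rfl

/-- `classwords`, re-read in the present memory, is the `W` of the entry. -/
theorem w_eq (c : Common u₀ g v) : Residue.W v.mem g.f g.r = g.W := c.reads.W

/-- **R7b: `classwords ≥ 1`** — why the three `while (pcount < part_read)` terminate. -/
theorem w_pos (he : Entered u₀ g) (c : Common u₀ g v) : 1 ≤ g.W := by
  have h := (c.resAt he).R7b
  rw [c.w_eq] at h
  exact h

/-- The channel count is the `C` of the entry. -/
theorem c_eq (c : Common u₀ g v) : nchan v.mem g.f = g.C := by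
  unfold G.C
  rw [nchan_def, nchan_def]
  have e : stb_vorbis.channels v.mem g.f = stb_vorbis.channels g.e.mem g.f := by
    simp only [vacc, voff]
    exact c.obj.i32 4 (by decide)
  rw [e]

/-- The outstanding temp block is TB (`ADOBusy.tblock`): its check sites are `TempRows.site_rowptr` / `.site_slot` with
`ArenaOK.tblock_live_inv`. -/
theorem tblock (c : Common u₀ g v) : g.A'.TBlock g.TB.base g.TB.size := by
  have hb : ADOBusy g.A' g.others' v.mem g.f g.sz := c.point.busy
  exact hb.tblock

end Common

/-! ### Path-independent cut points -/

/-- **0x10ee39, the head of loop 2152** `for (i=0; i < ch; ++i) if (!do_not_decode[i]) memset(residue_buffers[i], 0, 4n)`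
(exit of .1, entry of .2; the loop is inside .2, so `i` is not a ghost parameter). COMMON; `ebx = i`, `0 ≤ i ≤ ch`; `r14d = ch`;
`r15 = do_not_decode`; `[rbp−0xb8] = r` (8 bytes); `[rbp−0x98] = tap`; `[rbp−0xc8] = n`; `[rbp−0xa0] = do_not_decode`. -/
structure At3 (u₀ : State) (g : G) (v : State) : Prop where
  rip : v.rip = L.decode_residue.cut3
  common : Common u₀ g v
  i : ∃ i : Nat, i ≤ g.ch ∧ v.reg .rbx = UInt64.ofNat i
  r14 : v.reg .r14 = UInt64.ofNat g.ch
  r15 : v.reg .r15 = g.e.reg .r9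
  sl_r : v.mem.readLE (g.e.reg .rsp - 192) 8 = g.r
  sl_tap : v.mem.readLE (g.e.reg .rsp - 160) 4 = g.tap
  sl_n : v.mem.readLE (g.e.reg .rsp - 208) 4 = g.n
  sl_dnd : UInt64.ofNat (v.mem.readLE (g.e.reg .rsp - 168) 8) = g.e.reg .r9

/-- **0x10ef08, path A** (exit of .2 when `rtype = 2 ∧ ch ≠ 1`, entry of .3). COMMON; `r14 = r`; `r15d = tap`;
`[rbp−0xa0] = do_not_decode`; `[rbp−0xc8] = n`. -/
structure At8 (u₀ : State) (g : G) (v : State) : Prop where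
  rip : v.rip = L.decode_residue.cut8
  common : Common u₀ g v
  rtype2 : g.rtype = 2
  ch_ne : g.ch ≠ 1
  r14 : v.reg .r14 = UInt64.ofNat g.r
  r15 : v.reg .r15 = UInt64.ofNat g.tap
  sl_dnd : UInt64.ofNat (v.mem.readLE (g.e.reg .rsp - 168) 8) = g.e.reg .r9
  sl_n : v.mem.readLE (g.e.reg .rsp - 208) 4 = g.n

/-- **0x10eea8, path B** (exit of .2 when `rtype ≠ 2 ∨ ch = 1`, entry of .8). COMMON; `r14 = r`; `r15d = tap`;
`[rbp−0xa0] = do_not_decode` (kept for the whole path B). -/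
structure At5 (u₀ : State) (g : G) (v : State) : Prop where
  rip : v.rip = L.decode_residue.cut5
  common : Common u₀ g v
  pathB : g.rtype ≠ 2 ∨ g.ch = 1
  r14 : v.reg .r14 = UInt64.ofNat g.r
  r15 : v.reg .r15 = UInt64.ofNat g.tap
  sl_dnd : UInt64.ofNat (v.mem.readLE (g.e.reg .rsp - 168) 8) = g.e.reg .r9

/-- **0x10fa53, `done:`** (entry of .11, exit of .3 .4 .6 .10): FR, the decoder invariant with the temp block outstanding,
`r15d = tap = L` (the argument of `arena_temp_restore`). -/
structure At32 (u₀ : State) (g : G) (v : State) : Prop where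
  rip : v.rip = L.decode_residue.cut32
  common : Common u₀ g v
  r15 : v.reg .r15 = UInt64.ofNat g.tap

/-- **0x10fafc, the trampoline `mov r15d,[rbp−0xec] ; jmp done`** (exit of .8: the pass loop of path B is over). -/
structure At36 (u₀ : State) (g : G) (v : State) : Prop where
  rip : v.rip = L.decode_residue.cut36
  common : Common u₀ g v
  sl_tap : v.mem.readLE (g.e.reg .rsp - 244) 4 = g.tap

/-- **0x10fb08, the trampoline `mov r15d,[rbp−0xdc] ; jmp done`** (exit of .5: `q == EOP`). -/
structure At37 (u₀ : State) (g : G) (v : State) : Prop where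
  rip : v.rip = L.decode_residue.cut37
  common : Common u₀ g v
  sl_tap : v.mem.readLE (g.e.reg .rsp - 228) 4 = g.tap

/-- **0x10fb14, the trampoline `mov r15d,[rbp−0xdc] ; jmp done`** (exit of .7: `q == EOP`). -/
structure At38 (u₀ : State) (g : G) (v : State) : Prop where
  rip : v.rip = L.decode_residue.cut38
  common : Common u₀ g v
  sl_tap : v.mem.readLE (g.e.reg .rsp - 228) 4 = g.tap

/-- **0x10fb20, the trampoline `mov r15d,[rbp−0xec] ; jmp done`** (exit of .9: `temp == EOP`). -/
structure At39 (u₀ : State) (g : G) (v : State) : Prop where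
  rip : v.rip = L.decode_residue.cut39
  common : Common u₀ g v
  sl_tap : v.mem.readLE (g.e.reg .rsp - 244) 4 = g.tap

/-! ### Path A: `rtype == 2 && ch != 1` -/

/-- **What every cut point of path A shares** (the pass loop 2163 and everything inside): `rtype = 2`; `ch ≥ 2` (`ch ≠ 1`, and
`ch = 0` left through `j == ch`); `[rbp−0xa0] = pass` (4 bytes; `do_not_decode` is dead on path A), `pass ≤ 7`;
`[rbp−0xdc] = tap`; `[rbp−0xc8] = n`. -/
structure PathA (g : G) (pass : Nat) (v : State) : Prop where
  rtype2 : g.rtype = 2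
  ch_ge : 2 ≤ g.ch
  pass_le : pass ≤ 7
  sl_pass : v.mem.readLE (g.e.reg .rsp - 168) 4 = pass
  sl_tap : v.mem.readLE (g.e.reg .rsp - 228) 4 = g.tap
  sl_n : v.mem.readLE (g.e.reg .rsp - 208) 4 = g.n

/-- **0x10f6a0, the latch `add DWORD [rbp−0xa0],1` of the pass loop 2163** (entry 2 of .3, exit of .4 and .6: the `while` of
pass `pass` is over). The invariant of loop 2163 with `pass ≤ 7` BEFORE the add; FILL(0, KK) (the `while` was left with
`pcount ≥ part_read`: `WInv.exit_fill`); `r15 = r`. Measure of the loop: `8 − pass`. -/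
structure At24 (u₀ : State) (g : G) (pass : Nat) (v : State) : Prop where
  rip : v.rip = L.decode_residue.cut24
  common : Common u₀ g v
  path : PathA g pass v
  r15 : v.reg .r15 = UInt64.ofNat g.r
  fillK : Fill v.mem g.f g.r g.TB g.C g.PRD 0 (Res.ceilDiv g.PRD g.W)

/-- **The head of a `while (pcount < part_read)` of path A** (0x10f2a3 for `ch = 2` with `r` in r14, 0x10f64c for `ch > 2` with
`r` in r12): WA = `WInv … rowsA pass cs pcount` (`pcount = min(cs·W, PRD)` exactly: D-15; pass 0: FILL(0, cs); pass ≥ 1: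
FILL(0, KK)); `r15d = pcount`; `[rbp−0xd8] = class_set`. Measure: `PRD − pcount`. -/
structure WhileA (g : G) (pass cs pcount : Nat) (v : State) : Prop where
  path : PathA g pass v
  r15 : v.reg .r15 = UInt64.ofNat pcount
  sl_cs : v.mem.readLE (g.e.reg .rsp - 224) 4 = cs
  wa : WInv v.mem g.f g.r g.TB g.C g.PRD g.W g.rowsA pass cs pcount

/-- **Before an i-loop of path A** (0x10f2e6 / 0x10f692: `mov r13d,0 ; jmp head`, reached from DECODE and by fall-through when
`pass ≠ 0`): the invariant of the i-loop with `i = 0` still to be set: `WInnerInv … rowsA pass cs 0 pcount` (so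
`pcount = cs·W < PRD`, the slot `cs` of row 0 holds a row pointer); CI on the two ints of the protected frame
(`InterAt`: `0 ≤ c_inter < ch`, `0 ≤ p_inter`, `p_inter·ch + c_inter ≤ n·ch`); `r15d = pcount`; `[rbp−0xd8] = class_set`. -/
structure InnerA (g : G) (pass cs pcount : Nat) (v : State) : Prop where
  path : PathA g pass v
  r15 : v.reg .r15 = UInt64.ofNat pcount
  sl_cs : v.mem.readLE (g.e.reg .rsp - 224) 4 = cs
  wi : WInnerInv v.mem g.f g.r g.TB g.C g.PRD g.W g.rowsA pass cs 0 pcount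
  inter : InterAt v.mem g.ci g.pi g.ch g.n

/-- **Before DECODE of pass 0 on path A** (0x10ef70 / 0x10f314): `pass = 0` (`[rbp−0xa0] = 0`); WA with `pcount < part_read`
(so `class_set < part_read`: the slot that will be stored exists); CI set for `z(pcount)`; `r15d = pcount`;
`[rbp−0xd8] = class_set`. -/
structure DecodeA (g : G) (cs pcount : Nat) (v : State) : Prop where
  path : PathA g 0 v
  r15 : v.reg .r15 = UInt64.ofNat pcount
  sl_cs : v.mem.readLE (g.e.reg .rsp - 224) 4 = cs
  wa : WInv v.mem g.f g.r g.TB g.C g.PRD g.W g.rowsA 0 cs pcount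
  lt : pcount < g.PRD
  inter : InterAt v.mem g.ci g.pi g.ch g.n

/-- **0x10f2a3, the head of `while` 2166** (`ch = 2`; exit of .3, entry of .4): `WhileA` with `r14 = r`. -/
structure At15 (u₀ : State) (g : G) (pass cs pcount : Nat) (v : State) : Prop where
  rip : v.rip = L.decode_residue.cut15
  common : Common u₀ g v
  ch2 : g.ch = 2
  r14 : v.reg .r14 = UInt64.ofNat g.r
  loop : WhileA g pass cs pcount v

/-- **0x10f2e6, before the i-loop 2183** (`ch = 2`; entry 2 of .4, exit of .5): `InnerA` with `r14 = r`. -/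
structure At16 (u₀ : State) (g : G) (pass cs pcount : Nat) (v : State) : Prop where
  rip : v.rip = L.decode_residue.cut16
  common : Common u₀ g v
  ch2 : g.ch = 2
  r14 : v.reg .r14 = UInt64.ofNat g.r
  loop : InnerA g pass cs pcount v

/-- **0x10ef70, DECODE(q,f,c) expansion #1** (`ch = 2`, pass 0; exit of .4, entry of .5): `DecodeA` with `r14 = r`. -/
structure At10 (u₀ : State) (g : G) (cs pcount : Nat) (v : State) : Prop where
  rip : v.rip = L.decode_residue.cut10
  common : Common u₀ g v
  ch2 : g.ch = 2
  r14 : v.reg .r14 = UInt64.ofNat g.r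
  loop : DecodeA g cs pcount v

/-- **0x10f64c, the head of `while` 2212** (`ch > 2`; exit of .3, entry of .6): `WhileA` with `r12 = r` (r14 is scratch). -/
structure At22 (u₀ : State) (g : G) (pass cs pcount : Nat) (v : State) : Prop where
  rip : v.rip = L.decode_residue.cut22
  common : Common u₀ g v
  ch3 : 3 ≤ g.ch
  r12 : v.reg .r12 = UInt64.ofNat g.r
  loop : WhileA g pass cs pcount v

/-- **0x10f692, before the i-loop 2229** (`ch > 2`; entry 2 of .6, exit of .7): `InnerA` with `r12 = r`. -/
structure At23 (u₀ : State) (g : G) (pass cs pcount : Nat) (v : State) : Prop where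
  rip : v.rip = L.decode_residue.cut23
  common : Common u₀ g v
  ch3 : 3 ≤ g.ch
  r12 : v.reg .r12 = UInt64.ofNat g.r
  loop : InnerA g pass cs pcount v

/-- **0x10f314, DECODE(q,f,c) expansion #2** (`ch > 2`, pass 0; exit of .6, entry of .7): `DecodeA` with `r12 = r`. -/
structure At17 (u₀ : State) (g : G) (cs pcount : Nat) (v : State) : Prop where
  rip : v.rip = L.decode_residue.cut17
  common : Common u₀ g v
  ch3 : 3 ≤ g.ch
  r12 : v.reg .r12 = UInt64.ofNat g.r
  loop : DecodeA g cs pcount v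

/-! ### Path B: `rtype != 2 || ch == 1` -/

/-- **What every cut point of path B inside the `while` 2259 shares**: `[rbp−0xa0] = do_not_decode`; `[rbp−0x98] = class_set`;
`[rbp−0xec] = tap`. (`[rbp−0xc8]`, `[rbp−0xdc]`, `[rbp−0xb8]`, `[rbp−0xf0]` change their meaning from cut to cut.) -/
structure PathB (g : G) (cs : Nat) (v : State) : Prop where
  pathB : g.rtype ≠ 2 ∨ g.ch = 1
  sl_dnd : UInt64.ofNat (v.mem.readLE (g.e.reg .rsp - 168) 8) = g.e.reg .r9
  sl_cs : v.mem.readLE (g.e.reg .rsp - 160) 4 = cs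
  sl_tap : v.mem.readLE (g.e.reg .rsp - 244) 4 = g.tap

/-- **0x10f7a5, the head of the j-loop 2261** (pass 0: `part_classdata[j][class_set] = r->classdata[DECODE]` for every decoded
channel; exit of .8, entry of .9; the loop is inside .9, so `j` is not a ghost parameter). `r15d = j`, `0 ≤ j ≤ ch`; `r12 = f`;
`[rbp−0xc8] = r` (8 bytes); `[rbp−0xdc] = 0` (pass); `[rbp−0xf0] = pcount`; WB = `WInv … rowsB 0 cs pcount` with
`pcount < part_read`; the rows `j' < j` that matter are already filled up to `class_set + 1`. -/
structure At28 (u₀ : State) (g : G) (cs pcount : Nat) (v : State) : Prop where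
  rip : v.rip = L.decode_residue.cut28
  common : Common u₀ g v
  path : PathB g cs v
  r12 : v.reg .r12 = g.e.reg .rdi
  sl_r : v.mem.readLE (g.e.reg .rsp - 208) 8 = g.r
  sl_pass : v.mem.readLE (g.e.reg .rsp - 228) 4 = 0
  sl_pcount : v.mem.readLE (g.e.reg .rsp - 248) 4 = pcount
  wb : WInv v.mem g.f g.r g.TB g.C g.PRD g.W g.rowsB 0 cs pcount
  lt : pcount < g.PRD
  j : ∃ j : Nat, j ≤ g.ch ∧ v.reg .r15 = UInt64.ofNat j ∧
    ∀ j', j' < j → g.rowsB j' → Fill v.mem g.f g.r g.TB g.C g.PRD j' (cs + 1)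

/-- **0x10f8f8, after the j-loop 2261** (exit of .9, entry 2 of .8): `[rbp−0xdc] = 0` (pass), `[rbp−0xf0] = pcount`,
`[rbp−0xc8] = r` (8 bytes); every row that matters is filled up to `class_set + 1`: the invariant of the i-loop 2278 with
`i = 0` (`WInnerInv … rowsB 0 cs 0 pcount`). -/
structure At29 (u₀ : State) (g : G) (cs pcount : Nat) (v : State) : Prop where
  rip : v.rip = L.decode_residue.cut29
  common : Common u₀ g v
  path : PathB g cs v
  sl_r : v.mem.readLE (g.e.reg .rsp - 208) 8 = g.r
  sl_pass : v.mem.readLE (g.e.reg .rsp - 228) 4 = 0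
  sl_pcount : v.mem.readLE (g.e.reg .rsp - 248) 4 = pcount
  wi : WInnerInv v.mem g.f g.r g.TB g.C g.PRD g.W g.rowsB 0 cs 0 pcount

/-- **What the two cut points inside the i-loop 2278 share** (the head of the j-loop 2279 and the latch of 2278):
`r15 = r`; `[rbp−0xb8] = i` (4 bytes), `i < W`; `[rbp−0xdc] = pcount`, `pcount < part_read`; `[rbp−0xc8] = pass` (4 bytes),
`pass ≤ 7`; the invariant of 2278 (`WInnerInv … rowsB pass cs i pcount`). -/
structure InnerB (g : G) (pass cs i pcount : Nat) (v : State) : Prop where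
  path : PathB g cs v
  pass_le : pass ≤ 7
  r15 : v.reg .r15 = UInt64.ofNat g.r
  sl_i : v.mem.readLE (g.e.reg .rsp - 192) 4 = i
  sl_pcount : v.mem.readLE (g.e.reg .rsp - 228) 4 = pcount
  sl_pass : v.mem.readLE (g.e.reg .rsp - 208) 4 = pass
  i_lt : i < g.W
  lt : pcount < g.PRD
  wi : WInnerInv v.mem g.f g.r g.TB g.C g.PRD g.W g.rowsB pass cs i pcount

/-- **0x10f914, the head of the j-loop 2279** (`residue_decode` for every decoded channel; exit of .8, entry of .10; the loop is
inside .10, so `j` is not a ghost parameter): `ebx = j`, `0 ≤ j ≤ ch`; `InnerB`. -/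
structure At30 (u₀ : State) (g : G) (pass cs i pcount : Nat) (v : State) : Prop where
  rip : v.rip = L.decode_residue.cut30
  common : Common u₀ g v
  loop : InnerB g pass cs i pcount v
  j : ∃ j : Nat, j ≤ g.ch ∧ v.reg .rbx = UInt64.ofNat j

/-- **0x10fa8d, the latch of the i-loop 2278** (`++i, ++pcount` still to be done; exit of .10, entry 3 of .8): `InnerB`. -/
structure At34 (u₀ : State) (g : G) (pass cs i pcount : Nat) (v : State) : Prop where
  rip : v.rip = L.decode_residue.cut34
  common : Common u₀ g v
  loop : InnerB g pass cs i pcount v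

/-! ### The statements of the 11 segments

`Seg<k> Lay μ u₀` is what the proof unit `decode_residue.<k>` proves (its `Statement` adds the hypotheses every statement shares:
the layout, `MicroOK μ`, the function's bytes in `u₀`, the contracts of the segment's callees) and what the composition unit
`decode_residue.COMPOSITION` assumes. Every `Seg<k>` quantifies over the ghost bundle `g` of one activation, with the entry
state's `AtEntry` and the function's precondition as hypotheses, and says: from every state that satisfies an ENTRY assertion of
the segment the machine reaches a state that satisfies one of its EXIT assertions (`ReachVia`: every state on the way is in
`WayInv`). Where a loop crosses the segment boundary the exit assertion carries the loop variables' new values. -/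

/-- **decode_residue.1** (0x10ec00–0x10ee34; C 2132–2152): prologue, protected frame, residue lookup, `part_read` arithmetic, the
temp allocation (`setup_temp_malloc` succeeds: T3 + `temp_alloc_ok`; its result is NOT tested by the code), `make_block_array`,
init of loop 2152. From the function's entry to the head of loop 2152 with `i = 0`. (The `alloca` arm 0x10ee11 is dead:
`alloc_buffer ≠ 0` by AR5 + AR1.) -/
def Seg1 (Lay : Layout) (μ : Microarch) (u₀ : State) : Prop :=
  ∀ g : G, Entered u₀ g →
    ReachVia Lay μ WayInv g.e (fun v' => At3 u₀ g v')

/-- **decode_residue.2** (0x10ee36–0x10eea6; C 2152–2156): the memset loop 2152 and the dispatch `rtype == 2 && ch != 1`. -/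
def Seg2 (Lay : Layout) (μ : Microarch) (u₀ : State) : Prop :=
  ∀ g : G, Entered u₀ g →
    ∀ v, At3 u₀ g v →
      ReachVia Lay μ WayInv v (fun v' => At8 u₀ g v' ∨ At5 u₀ g v')

/-- **decode_residue.3** (path A control; C 2157–2165, 2211): loop 2157 and `if (j == ch) goto done`; the pass loop 2163: head,
latch, dispatch on `ch`, init of both variants, exit. Entry 1 (0x10ef08): to `done`, or to the `while` head of pass 0. Entry 2
(0x10f6a0, the latch, `pass ≤ 7` before the add): to `done` (`pass + 1 > 7`), or to the `while` head of pass `pass + 1`. -/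
def Seg3 (Lay : Layout) (μ : Microarch) (u₀ : State) : Prop :=
  ∀ g : G, Entered u₀ g →
    (∀ v, At8 u₀ g v →
      ReachVia Lay μ WayInv v (fun v' => At32 u₀ g v' ∨ At15 u₀ g 0 0 0 v' ∨ At22 u₀ g 0 0 0 v')) ∧
    (∀ pass v, At24 u₀ g pass v →
      ReachVia Lay μ WayInv v (fun v' => At32 u₀ g v' ∨ At15 u₀ g (pass + 1) 0 0 v' ∨ At22 u₀ g (pass + 1) 0 0 v'))

/-- **decode_residue.4** (path A, `ch = 2`; C 2166–2169, 2183–2208): the `while` 2166 head, `z` / `c_inter` / `p_inter`, the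
i-loop 2183 with the `codebook_decode_deinterleave_repeat` call and the `b < 0` arm, `++class_set`. Entry 1 (the `while` head):
to DECODE #1 with the same `class_set`, `pcount` (ONLY in pass 0, `pcount < part_read`), or to the pass latch (`pcount ≥ part_read`; in a
pass ≥ 1 the whole `while` runs inside this segment), or to `done` (the callee returned 0). Entry 2 (before the i-loop): the
same, and a return to DECODE #1 comes with a LARGER `pcount` (the i-loop ran at least once: R7b). -/
def Seg4 (Lay : Layout) (μ : Microarch) (u₀ : State) : Prop :=
  ∀ g : G, Entered u₀ g →
    (∀ pass cs pcount v, At15 u₀ g pass cs pcount v →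
      ReachVia Lay μ WayInv v (fun v' => (pass = 0 ∧ At10 u₀ g cs pcount v') ∨ At24 u₀ g pass v' ∨ At32 u₀ g v')) ∧
    (∀ pass cs pcount v, At16 u₀ g pass cs pcount v →
      ReachVia Lay μ WayInv v (fun v' =>
        (pass = 0 ∧ ∃ cs' pcount', pcount < pcount' ∧ At10 u₀ g cs' pcount' v') ∨ At24 u₀ g pass v' ∨ At32 u₀ g v'))

/-- **decode_residue.5** (path A, `ch = 2`, pass 0; C 2170–2175): DECODE(q,f,c) expansion #1, `if (q == EOP) goto done`,
`part_classdata[0][class_set] = r->classdata[q]`. To the i-loop's entry with FILL(0, class_set + 1), or to the trampoline. -/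
def Seg5 (Lay : Layout) (μ : Microarch) (u₀ : State) : Prop :=
  ∀ g : G, Entered u₀ g →
    ∀ cs pcount v, At10 u₀ g cs pcount v →
      ReachVia Lay μ WayInv v (fun v' => At16 u₀ g 0 cs pcount v' ∨ At37 u₀ g v')

/-- **decode_residue.6** (path A, `ch > 2`; C 2212–2215, 2229–2248): as .4 with `r` in r12 and `idiv` for `z % ch`, `z / ch`. -/
def Seg6 (Lay : Layout) (μ : Microarch) (u₀ : State) : Prop :=
  ∀ g : G, Entered u₀ g →
    (∀ pass cs pcount v, At22 u₀ g pass cs pcount v →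
      ReachVia Lay μ WayInv v (fun v' => (pass = 0 ∧ At17 u₀ g cs pcount v') ∨ At24 u₀ g pass v' ∨ At32 u₀ g v')) ∧
    (∀ pass cs pcount v, At23 u₀ g pass cs pcount v →
      ReachVia Lay μ WayInv v (fun v' =>
        (pass = 0 ∧ ∃ cs' pcount', pcount < pcount' ∧ At17 u₀ g cs' pcount' v') ∨ At24 u₀ g pass v' ∨ At32 u₀ g v'))

/-- **decode_residue.7** (path A, `ch > 2`, pass 0; C 2216–2221): DECODE expansion #2 and the classdata store. -/
def Seg7 (Lay : Layout) (μ : Microarch) (u₀ : State) : Prop :=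
  ∀ g : G, Entered u₀ g →
    ∀ cs pcount v, At17 u₀ g cs pcount v →
      ReachVia Lay μ WayInv v (fun v' => At23 u₀ g 0 cs pcount v' ∨ At38 u₀ g v')

/-- **decode_residue.8** (path B control; C 2257–2261, 2278–2279, 2299): the pass loop 2257, the `while` 2259, the hand-over to /
from the j-loop 2261, the i-loop 2278 head and latch, `++class_set`. No call and no check inside. Entry 1 (0x10eea8): to the
j-loop 2261 of pass 0 (`part_read > 0`), or to the trampoline (`part_read = 0`: eight empty passes). Entry 2 (after the j-loop
2261): into the i-loop body with `i = 0`. Entry 3 (the latch of the i-loop, `++i, ++pcount`): the next `i`; or `++class_set`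
and the next `while` turn (pass 0: the j-loop 2261; pass ≥ 1: the i-loop body with `i = 0`); or the next pass
(`pcount + 1 ≥ part_read`, `pass < 7`: its first i-loop body, `class_set = pcount = i = 0`); or the trampoline (`pass = 7`). -/
def Seg8 (Lay : Layout) (μ : Microarch) (u₀ : State) : Prop :=
  ∀ g : G, Entered u₀ g →
    (∀ v, At5 u₀ g v →
      ReachVia Lay μ WayInv v (fun v' => At28 u₀ g 0 0 v' ∨ At36 u₀ g v')) ∧
    (∀ cs pcount v, At29 u₀ g cs pcount v →
      ReachVia Lay μ WayInv v (fun v' => At30 u₀ g 0 cs 0 pcount v')) ∧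
    (∀ pass cs i pcount v, At34 u₀ g pass cs i pcount v →
      ReachVia Lay μ WayInv v (fun v' =>
        At30 u₀ g pass cs (i + 1) (pcount + 1) v' ∨
        (pass = 0 ∧ At28 u₀ g (cs + 1) (pcount + 1) v') ∨
        (1 ≤ pass ∧ At30 u₀ g pass (cs + 1) 0 (pcount + 1) v') ∨
        At30 u₀ g (pass + 1) 0 0 0 v' ∨
        At36 u₀ g v'))

/-- **decode_residue.9** (path B, pass 0; C 2261–2268): the j-loop 2261 with DECODE(temp,f,c) expansion #3 and
`part_classdata[j][class_set] = r->classdata[temp]`. To the hand-over with every row that matters filled, or to the trampoline. -/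
def Seg9 (Lay : Layout) (μ : Microarch) (u₀ : State) : Prop :=
  ∀ g : G, Entered u₀ g →
    ∀ cs pcount v, At28 u₀ g cs pcount v →
      ReachVia Lay μ WayInv v (fun v' => At29 u₀ g cs pcount v' ∨ At39 u₀ g v')

/-- **decode_residue.10** (path B; C 2279–2292): the j-loop 2279: `c`, `b`, the `residue_decode` call. To the latch of the
i-loop, or (the callee returned 0) to `done`. -/
def Seg10 (Lay : Layout) (μ : Microarch) (u₀ : State) : Prop :=
  ∀ g : G, Entered u₀ g →
    ∀ pass cs i pcount v, At30 u₀ g pass cs i pcount v →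
      ReachVia Lay μ WayInv v (fun v' => At34 u₀ g pass cs i pcount v' ∨ At32 u₀ g v')

/-- **decode_residue.11** (C 2303–2311): `done:` `arena_temp_restore(f, temp_alloc_point)` (ADO again, for the entry's ghost
arena and live list), the epilogue's two shadow stores (`ShadowInv.epilogue_ra`), the six pops, `ret`: the function's `Returned`.
Five entries: `done` and the four trampolines that reload `temp_alloc_point`. -/
def Seg11 (Lay : Layout) (μ : Microarch) (u₀ : State) : Prop :=
  ∀ g : G, Entered u₀ g →
    (∀ v, At32 u₀ g v → ReachVia Lay μ WayInv v (Returned (conv u₀) g.spec g.e g.ret)) ∧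
    (∀ v, At36 u₀ g v → ReachVia Lay μ WayInv v (Returned (conv u₀) g.spec g.e g.ret)) ∧
    (∀ v, At37 u₀ g v → ReachVia Lay μ WayInv v (Returned (conv u₀) g.spec g.e g.ret)) ∧
    (∀ v, At38 u₀ g v → ReachVia Lay μ WayInv v (Returned (conv u₀) g.spec g.e g.ret)) ∧
    (∀ v, At39 u₀ g v → ReachVia Lay μ WayInv v (Returned (conv u₀) g.spec g.e g.ret))

end DecodeResidue

end Vorbis.Spec
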